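-- pv_equiv track=rewrite | github.com/PongDev/2110101-COMP-PROG | Grader/09_MoreDC_34/09_MoreDC_34.py | pattern4
-- ===== SOURCE A (Python) =====
-- def pattern4(N):
--     r=[[0 for i in range(N)] for i in range(N)]
--
--     count=1
--     for i in range(N):
--         for j in range(i,-1,-1):
--             r[j][i]=count
--             count+=1
--     return r
-- ===== SOURCE B (Python) =====
-- def pattern4(N):
--     return [[c * (c + 1) // 2 + (c - r) + 1 if c >= r else 0 for c in range(N)]
--             for r in range(N)]
-- ===== Notes on version B (the rewrite author's own statement) =====
-- stated objective: simpler
-- what changed: Replaces the diagonal walk with a running counter and in-place index assignments by a closed-form nested comprehension computing each cell directly from its row/column indices.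
import Mathlib
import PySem

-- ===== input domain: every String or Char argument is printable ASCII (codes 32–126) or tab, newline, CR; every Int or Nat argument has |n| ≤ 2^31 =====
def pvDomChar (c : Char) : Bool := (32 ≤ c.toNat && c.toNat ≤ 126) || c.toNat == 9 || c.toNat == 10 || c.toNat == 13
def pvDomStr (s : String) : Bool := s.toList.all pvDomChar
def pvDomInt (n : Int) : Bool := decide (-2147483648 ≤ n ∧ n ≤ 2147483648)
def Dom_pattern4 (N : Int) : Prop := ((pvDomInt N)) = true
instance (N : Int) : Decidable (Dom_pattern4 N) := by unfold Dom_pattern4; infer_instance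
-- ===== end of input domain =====

-- B replaces A's diagonal walk with a running counter by a closed-form per-cell formula (simpler).

-- ===== PORT A =====
-- r[j][i] = count : both indices are nonnegative and in range here, so pyGetD/pySetD are exact.
def pattern4 (N : Int) : List (List Int) :=
  let r : List (List Int) :=
    (PySem.List.pyRange 0 N 1).map (fun _ => (PySem.List.pyRange 0 N 1).map (fun _ => (0 : Int)))
  let st :=
    (PySem.List.pyRange 0 N 1).foldl
      (fun (st : List (List Int) × Int) (i : Int) =>
        (PySem.List.pyRange i (-1) (-1)).foldl
          (fun (st : List (List Int) × Int) (j : Int) =>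
            (PySem.List.pySetD st.1 j (PySem.List.pySetD (PySem.List.pyGetD st.1 j []) i st.2),
             st.2 + 1))
          st)
      (r, 1)
  st.1

-- ===== PORT B =====
def pattern4_alt (N : Int) : List (List Int) :=
  (PySem.List.pyRange 0 N 1).map (fun r =>
    (PySem.List.pyRange 0 N 1).map (fun c =>
      if r ≤ c then PySem.Int.floordiv (c * (c + 1)) 2 + (c - r) + 1 else 0))

-- ===== PRECONDITION & SPEC =====
def Spec_pattern4 (N : Int) (out : List (List Int)) : Prop := out = pattern4_alt N
instance (N : Int) (out : List (List Int)) : Decidable (Spec_pattern4 N out) := by unfold Spec_pattern4; infer_instance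

-- ===== CLAIM (what is proved, stated in full; the proofs are below) =====
def Claim_equal_pattern4 : Prop := ∀ (N : Int), Dom_pattern4 N → Spec_pattern4 N (pattern4 N)

-- ===== LEMMAS AND PROOFS =====

/-- triangular number as an Int. -/
def pvTri (c : Nat) : Int := ((c : Int) * (c + 1)) / 2

/-- the entry of A's matrix after the first `i` columns have been filled. -/
def pvEnt (i j c : Nat) : Int :=
  if c < i ∧ j ≤ c then pvTri c + ((c : Int) - (j : Int)) + 1 else 0

/-- the matrix after the first `i` columns have been filled. -/
def pvBuild (n i : Nat) : List (List Int) :=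
  (List.range n).map (fun j => (List.range n).map (fun c => pvEnt i j c))

theorem pvTri_succ (i : Nat) : pvTri (i + 1) = pvTri i + (i + 1) := by
  unfold pvTri
  push_cast
  have h : ((i : Int) + 1) * ((i : Int) + 1 + 1) = (i : Int) * ((i : Int) + 1) + 2 * ((i : Int) + 1) := by ring
  rw [h]
  generalize (i : Int) * ((i : Int) + 1) = a
  omega

/-- inner loop `for j in range(k, -1, -1): r[j][i]=count; count+=1` characterised. -/
theorem pv_inner (c : Int) (k : Nat) :
    ∀ (m : List (List Int)) (cnt : Int), k < m.length →
    (PySem.List.pyRange (k : Int) (-1) (-1)).foldl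
        (fun (st : List (List Int) × Int) (j : Int) =>
          (PySem.List.pySetD st.1 j (PySem.List.pySetD (PySem.List.pyGetD st.1 j []) c st.2),
           st.2 + 1)) (m, cnt)
      = (m.mapIdx (fun j row => if j ≤ k then PySem.List.pySetD row c (cnt + k - j) else row),
         cnt + k + 1) := by
  induction k with
  | zero =>
    intro m cnt hm
    rw [PySem.List.pyRange_neg_one_cons (by norm_num), PySem.List.pyRange_neg_one_eq_nil (by norm_num)]
    simp only [List.foldl_cons, List.foldl_nil]
    refine Prod.ext ?_ (by simp)
    simp only
    rw [PySem.List.pySetD_of_nonneg _ _ (by omega),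
        PySem.List.pyGetD_eq_getElem m [] (by omega) (by exact_mod_cast hm)]
    refine List.ext_getElem (by simp) ?_
    intro j h1 h2
    simp only [List.length_set] at h1
    simp only [List.getElem_mapIdx, List.getElem_set, Int.toNat_natCast]
    rcases Nat.eq_zero_or_pos j with hj | hj
    · subst hj
      rw [if_pos rfl, if_pos (le_refl 0)]
      norm_num
    · rw [if_neg (by omega), if_neg (by omega)]
  | succ k ih =>
    intro m cnt hm
    have hcons : PySem.List.pyRange ((k + 1 : Nat) : Int) (-1) (-1)
        = ((k + 1 : Nat) : Int) :: PySem.List.pyRange ((k : Nat) : Int) (-1) (-1) := by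
      have := PySem.List.pyRange_neg_one_cons (a := ((k + 1 : Nat) : Int)) (b := (-1)) (by omega)
      simpa using this
    rw [hcons]
    simp only [List.foldl_cons]
    rw [ih _ _ (by simp only [PySem.List.length_pySetD]; omega)]
    refine Prod.ext ?_ (by simp only; push_cast; ring)
    simp only
    rw [PySem.List.pySetD_of_nonneg m _ (by omega),
        PySem.List.pyGetD_eq_getElem m [] (by omega) (by exact_mod_cast hm)]
    refine List.ext_getElem (by simp) ?_
    intro j h1 h2
    simp only [List.length_mapIdx, List.length_set] at h1 h2
    simp only [List.getElem_mapIdx, List.getElem_set, Int.toNat_natCast]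
    by_cases hj : j = k + 1
    · subst hj
      rw [if_neg (by omega), if_pos rfl, if_pos (le_refl (k + 1))]
      congr 1
      push_cast
      ring
    · rw [if_neg (by omega : ¬ k + 1 = j)]
      by_cases hle : j ≤ k
      · rw [if_pos hle, if_pos (by omega : j ≤ k + 1)]
        congr 1
        push_cast
        ring
      · rw [if_neg hle, if_neg (by omega : ¬ j ≤ k + 1)]

/-- outer loop invariant: after the first `i` iterations the matrix is `pvBuild n i`
    and the counter is `1 + pvTri i`. -/
theorem pv_outer (n : Nat) :
    ∀ i : Nat, i ≤ n →
    (PySem.List.pyRange 0 (i : Int) 1).foldl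
        (fun (st : List (List Int) × Int) (i : Int) =>
          (PySem.List.pyRange i (-1) (-1)).foldl
            (fun (st : List (List Int) × Int) (j : Int) =>
              (PySem.List.pySetD st.1 j (PySem.List.pySetD (PySem.List.pyGetD st.1 j []) i st.2),
               st.2 + 1)) st)
        ((PySem.List.pyRange 0 (n : Int) 1).map
           (fun _ => (PySem.List.pyRange 0 (n : Int) 1).map (fun _ => (0 : Int))), 1)
      = (pvBuild n i, 1 + pvTri i) := by
  intro i
  induction i with
  | zero =>
    intro _
    rw [show ((0 : Nat) : Int) = 0 from rfl, PySem.List.pyRange_one_eq_nil le_rfl]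
    simp only [List.foldl_nil]
    refine Prod.ext ?_ (by simp only; norm_num [pvTri])
    simp only [PySem.List.pyRange_zero_natCast, pvBuild]
    refine List.ext_getElem (by simp) ?_
    intro j h1 h2
    simp only [List.getElem_map, List.getElem_range]
    refine List.ext_getElem (by simp) ?_
    intro c h3 h4
    simp [pvEnt]
  | succ i ih =>
    intro hin
    have hi : i ≤ n := by omega
    have hsplit : PySem.List.pyRange 0 ((i + 1 : Nat) : Int) 1
        = PySem.List.pyRange 0 (i : Int) 1 ++ [(i : Int)] := by
      have := PySem.List.pyRange_one_succ_right (a := 0) (b := (i : Int)) (by omega)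
      simpa using this
    rw [hsplit, List.foldl_append, ih hi]
    simp only [List.foldl_cons, List.foldl_nil]
    rw [pv_inner (i : Int) i (pvBuild n i) (1 + pvTri i)
         (by simp only [pvBuild, List.length_map, List.length_range]; omega)]
    refine Prod.ext ?_ ?_
    · simp only
      refine List.ext_getElem (by simp [pvBuild]) ?_
      intro j h1 h2
      simp only [List.length_mapIdx, pvBuild, List.length_map, List.length_range] at h1 h2
      simp only [pvBuild, List.getElem_mapIdx, List.getElem_map, List.getElem_range]
      by_cases hj : j ≤ i
      · rw [if_pos hj, PySem.List.pySetD_of_nonneg _ _ (by omega)]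
        refine List.ext_getElem (by simp) ?_
        intro c h3 h4
        simp only [List.length_set, List.length_map, List.length_range] at h3 h4
        rw [List.getElem_set]
        simp only [Int.toNat_natCast, List.getElem_map, List.getElem_range]
        by_cases hc : c = i
        · subst hc
          rw [if_pos rfl, pvEnt, if_pos (show c < c + 1 ∧ j ≤ c from ⟨by omega, hj⟩)]
          ring
        · rw [if_neg (by omega : ¬ i = c)]
          simp only [pvEnt]
          by_cases hcc : c < i ∧ j ≤ c
          · rw [if_pos hcc, if_pos (show c < i + 1 ∧ j ≤ c from ⟨by omega, hcc.2⟩)]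
          · rw [if_neg hcc, if_neg (by omega)]
      · rw [if_neg hj]
        refine List.ext_getElem (by simp) ?_
        intro c h3 h4
        simp only [List.length_map, List.length_range] at h3 h4
        simp only [List.getElem_map, List.getElem_range, pvEnt]
        rw [if_neg (by omega), if_neg (by omega)]
    · simp only [pvTri_succ]
      ring

theorem pattern4_eq_build (n : Nat) : pattern4 (n : Int) = pvBuild n n := by
  unfold pattern4
  simp only
  rw [pv_outer n n le_rfl]

theorem pattern4_alt_eq_build (n : Nat) : pattern4_alt (n : Int) = pvBuild n n := by
  unfold pattern4_alt pvBuild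
  rw [PySem.List.pyRange_zero_natCast]
  refine List.ext_getElem (by simp) ?_
  intro j h1 h2
  simp only [List.length_map, List.length_range] at h1 h2
  simp only [List.getElem_map, List.getElem_range]
  refine List.ext_getElem (by simp) ?_
  intro c h3 h4
  simp only [List.length_map, List.length_range] at h3 h4
  simp only [List.getElem_map, List.getElem_range, pvEnt]
  rw [PySem.Int.floordiv_eq_ediv_of_pos (by norm_num)]
  by_cases hjc : j ≤ c
  · rw [if_pos (by exact_mod_cast hjc), if_pos (show c < n ∧ j ≤ c from ⟨h3, hjc⟩)]
    simp [pvTri]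
  · rw [if_neg (by exact_mod_cast hjc), if_neg (by omega)]

-- ===== VERDICT (by name: the statement is the Claim_ definition above) =====
theorem pattern4_spec : Claim_equal_pattern4 := by
  intro N _
  unfold Spec_pattern4
  rcases le_or_gt N 0 with hN | hN
  · unfold pattern4 pattern4_alt
    rw [PySem.List.pyRange_one_eq_nil hN]
    simp
  · have h : N = ((N.toNat : Nat) : Int) := by omega
    rw [h, pattern4_eq_build, pattern4_alt_eq_build]
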